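-- pv_equiv track=rewrite | github.com/Cerber879/automata | lab1/main.py | selection_unique_transitions
-- ===== SOURCE A (Python) =====
-- def conditions_automata(symbol_condition, quantity_conditions):
--     conditions = []
--     for i in range(quantity_conditions):
--         conditions.append(symbol_condition + str(i))
--
--     return conditions
--
-- def selection_unique_transitions(lines):
--     transitions = []
--     conditions = conditions_automata(lines[0][0][:1], len(lines[0]))
--
--     for sublist in lines[1:]:
--         for item in sublist[1:]:
--             if item not in transitions:
--                 transitions.append(item)
--                 if conditions and item.split('/')[0] in conditions:
--                     conditions.remove(item.split('/')[0])
--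
--     for condition in conditions:
--         transitions.append(condition)
--
--     return transitions
-- ===== SOURCE B (Python) =====
-- def selection_unique_transitions(lines):
--     # one flat dedup pass, then a set lookup table, then a filter pass
--     items = [item for sublist in lines[1:] for item in sublist[1:]]
--     transitions = list(dict.fromkeys(items))
--     used = {t.split('/')[0] for t in transitions}
--     conditions = [lines[0][0][:1] + str(i) for i in range(len(lines[0]))]
--     return transitions + [c for c in conditions if c not in used]
-- ===== Notes on version B (the rewrite author's own statement) =====
-- stated objective: faster
-- what changed: Replaces A's single nested loop that interleaves a linear 'not in transitions' scan with in-place whittling of the conditions list by three flat passes: a flatten+dedup pass (dict.fromkeys) over the transition items, a 'used' prefix set computed from the deduplicated transitions, and one filter pass over the freshly built conditions list.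
-- crash fix: On inputs where lines is nonempty but its first row is empty, A raises IndexError on lines[0][0] while B returns the deduplicated transitions list (there are no conditions to append). — e.g. on selection_unique_transitions([[], ["a", "b/0", "b/0"]]): A raises IndexError, B returns ["b/0"]
import Mathlib
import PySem

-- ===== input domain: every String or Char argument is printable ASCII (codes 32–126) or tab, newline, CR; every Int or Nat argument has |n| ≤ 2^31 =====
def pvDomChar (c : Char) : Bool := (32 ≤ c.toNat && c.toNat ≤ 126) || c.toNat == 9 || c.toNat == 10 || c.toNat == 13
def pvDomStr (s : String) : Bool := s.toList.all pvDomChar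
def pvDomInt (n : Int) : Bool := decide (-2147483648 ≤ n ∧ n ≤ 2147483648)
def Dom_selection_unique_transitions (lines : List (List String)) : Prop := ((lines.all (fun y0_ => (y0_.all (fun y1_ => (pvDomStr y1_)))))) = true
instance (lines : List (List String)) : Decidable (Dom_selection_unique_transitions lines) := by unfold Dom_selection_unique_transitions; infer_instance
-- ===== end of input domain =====

-- B separates the work into three flat passes (hash-based dedup, a 'used' prefix table, a filter over the conditions)
-- instead of A's single nested loop whose 'not in transitions' scan is quadratic; objective: faster (measured).

-- item.split('/')[0]: split with the nonempty separator "/" always succeeds and never returns an empty list,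
-- so getD/headD are exact here
def pySplitHead (s : String) : String := ((PySem.Str.split? s "/").getD []).headD ""

-- ===== PORT A =====
def conditions_automata (symbol_condition : String) (quantity_conditions : Int) : List String :=
  (PySem.List.pyRange 0 quantity_conditions 1).foldl
    (fun conditions i => conditions ++ [symbol_condition ++ PySem.Int.toStr i]) []

-- the body of A's nested loop; conditions.remove(x) is List.erase (first occurrence), exact because the guard ensures membership
def selA_inner (st : List String × List String) (item : String) : List String × List String :=
  if item ∈ st.1 then st
  else
    (st.1 ++ [item],
     if st.2 ≠ [] ∧ pySplitHead item ∈ st.2 then st.2.erase (pySplitHead item) else st.2)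

-- lines[0] / lines[0][0] raise outside Pre_; the getD/headD totalisation is exact under Pre_
def selection_unique_transitions (lines : List (List String)) : List String :=
  let conditions := conditions_automata
      (PySem.Str.slice (((PySem.List.pyGet? lines 0).getD []).headD "") none (some 1))
      ((((PySem.List.pyGet? lines 0).getD []) : List String).length : Int)
  let st := (PySem.List.slice lines (some 1) none).foldl
      (fun st sublist => (PySem.List.slice sublist (some 1) none).foldl selA_inner st)
      ([], conditions)
  st.2.foldl (fun transitions condition => transitions ++ [condition]) st.1

-- ===== PORT B =====
def selection_unique_transitions_alt (lines : List (List String)) : List String :=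
  let items := (PySem.List.slice lines (some 1) none).flatMap
      (fun sublist => PySem.List.slice sublist (some 1) none)
  let transitions := PySem.List.dedup items
  let used : PySem.Set String := PySem.Set.ofList (transitions.map pySplitHead)
  -- in Source B lines[0][0] sits inside the comprehension body, evaluated only when the range is nonempty; headD is exact then
  let conditions := (PySem.List.pyRange 0 ((((PySem.List.pyGet? lines 0).getD []) : List String).length : Int) 1).map
      (fun i => PySem.Str.slice (((PySem.List.pyGet? lines 0).getD []).headD "") none (some 1) ++ PySem.Int.toStr i)
  transitions ++ conditions.filter (fun c => !(PySem.Set.contains used c))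

-- ===== PRECONDITION & SPEC =====
-- A evaluates lines[0][0], which raises IndexError when lines is empty or its first row is empty
def Pre_selection_unique_transitions (lines : List (List String)) : Prop :=
  lines ≠ [] ∧ lines.headD [] ≠ []
instance (lines : List (List String)) : Decidable (Pre_selection_unique_transitions lines) := by
  unfold Pre_selection_unique_transitions; infer_instance

def pvWitness_selection_unique_transitions : List (List String) :=
  [["s0", "s1"], ["x", "a/0", "s0"], ["y", "a/0"]]

-- On a nonempty lines whose first row is empty, A raises IndexError on lines[0][0] while B returns the deduplicated transitions (there are no conditions to append)
def Raises_selection_unique_transitions (lines : List (List String)) : Prop :=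
  lines ≠ [] ∧ lines.headD [] = []
instance (lines : List (List String)) : Decidable (Raises_selection_unique_transitions lines) := by
  unfold Raises_selection_unique_transitions; infer_instance
def pvRaiseWitness_selection_unique_transitions : List (List String) := [[], ["a", "b/0", "b/0"]]
def pvRaiseWitnessOut_selection_unique_transitions : List String := ["b/0"]

def Spec_selection_unique_transitions (lines : List (List String)) (out : List String) : Prop :=
  out = selection_unique_transitions_alt lines
instance (lines : List (List String)) (out : List String) : Decidable (Spec_selection_unique_transitions lines out) := by
  unfold Spec_selection_unique_transitions; infer_instance

-- ===== CLAIM (what is proved, stated in full; the proofs are below) =====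
def Claim_equal_selection_unique_transitions : Prop :=
  ∀ (lines : List (List String)), Dom_selection_unique_transitions lines →
    Pre_selection_unique_transitions lines →
    Spec_selection_unique_transitions lines (selection_unique_transitions lines)

def Claim_raises_selection_unique_transitions : Prop :=
  (∀ (lines : List (List String)), Dom_selection_unique_transitions lines →
    Raises_selection_unique_transitions lines → ¬ Pre_selection_unique_transitions lines) ∧
  (Dom_selection_unique_transitions (pvRaiseWitness_selection_unique_transitions) ∧
   Raises_selection_unique_transitions (pvRaiseWitness_selection_unique_transitions) ∧
   selection_unique_transitions_alt (pvRaiseWitness_selection_unique_transitions) = pvRaiseWitnessOut_selection_unique_transitions)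

-- ===== LEMMAS AND PROOFS =====

-- proof-side: elements of l not already in ts, first occurrences, in order
def pvDedupFrom : List String → List String → List String
  | _, [] => []
  | ts, x :: l => if x ∈ ts then pvDedupFrom ts l else x :: pvDedupFrom (ts ++ [x]) l

-- proof-side: decimal digits of n, most significant first
def pvRepr (n : Nat) : List Char :=
  if n < 10 then [Nat.digitChar n]
  else pvRepr (n / 10) ++ [Nat.digitChar (n % 10)]
  decreasing_by exact Nat.div_lt_self (by omega) (by omega)

lemma pvRepr_eq (n : Nat) :
    pvRepr n = if n < 10 then [Nat.digitChar n] else pvRepr (n / 10) ++ [Nat.digitChar (n % 10)] := by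
  rw [pvRepr]

lemma pvRepr_ne_nil (n : Nat) : pvRepr n ≠ [] := by
  rw [pvRepr_eq]; split <;> simp

lemma digitChar_inj (a b : Nat) (ha : a < 10) (hb : b < 10)
    (h : Nat.digitChar a = Nat.digitChar b) : a = b := by
  interval_cases a <;> interval_cases b <;> revert h <;> decide

lemma pvRepr_inj (m : Nat) : ∀ n, pvRepr m = pvRepr n → m = n := by
  induction m using Nat.strong_induction_on with
  | _ m ih =>
    intro n h
    rw [pvRepr_eq m, pvRepr_eq n] at h
    by_cases hm : m < 10 <;> by_cases hn : n < 10
    · rw [if_pos hm, if_pos hn] at h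
      exact digitChar_inj m n hm hn (by simpa using h)
    · rw [if_pos hm, if_neg hn] at h
      have hl := congrArg List.length h
      simp only [List.length_append, List.length_cons, List.length_nil] at hl
      exact absurd (List.eq_nil_of_length_eq_zero (by omega)) (pvRepr_ne_nil (n / 10))
    · rw [if_neg hm, if_pos hn] at h
      have hl := congrArg List.length h
      simp only [List.length_append, List.length_cons, List.length_nil] at hl
      exact absurd (List.eq_nil_of_length_eq_zero (by omega)) (pvRepr_ne_nil (m / 10))
    · rw [if_neg hm, if_neg hn] at h
      have h2 := List.append_inj' h (by simp)
      have hdiv := ih (m / 10) (Nat.div_lt_self (by omega) (by omega)) (n / 10) h2.1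
      have hmod : m % 10 = n % 10 := by
        have h3 := h2.2
        simp only [List.cons.injEq, and_true] at h3
        exact digitChar_inj _ _ (Nat.mod_lt _ (by omega)) (Nat.mod_lt _ (by omega)) h3
      omega

lemma toDigitsCore_eq_pvRepr : ∀ (f n : Nat) (ds : List Char), n < f →
    Nat.toDigitsCore 10 f n ds = pvRepr n ++ ds := by
  intro f
  induction f with
  | zero => intro n ds h; omega
  | succ f ih =>
    intro n ds h
    rw [Nat.toDigitsCore]
    by_cases h10 : n < 10
    · have hz : n / 10 = 0 := Nat.div_eq_of_lt h10
      rw [if_pos hz, pvRepr_eq, if_pos h10, Nat.mod_eq_of_lt h10]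
      simp
    · have hne : n / 10 ≠ 0 := by
        have := Nat.div_pos (by omega : 10 ≤ n) (by omega : 0 < 10)
        omega
      have hlt : n / 10 < f := by
        have : n / 10 < n := Nat.div_lt_self (by omega) (by omega)
        omega
      rw [if_neg hne, pvRepr_eq n, if_neg h10, ih (n / 10) _ hlt]
      simp

lemma toDigits_eq_pvRepr (n : Nat) : Nat.toDigits 10 n = pvRepr n := by
  rw [Nat.toDigits]
  simpa using toDigitsCore_eq_pvRepr (n + 1) n [] (by omega)

lemma toStr_inj_nonneg (i j : Int) (hi : 0 ≤ i) (hj : 0 ≤ j)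
    (h : PySem.Int.toStr i = PySem.Int.toStr j) : i = j := by
  have h1 : PySem.Int.toChars i = PySem.Int.toChars j := by
    rw [← PySem.Int.toList_toStr, ← PySem.Int.toList_toStr, h]
  simp only [PySem.Int.toChars] at h1
  rw [if_neg (by omega), if_neg (by omega)] at h1
  rw [toDigits_eq_pvRepr, toDigits_eq_pvRepr] at h1
  have := pvRepr_inj _ _ h1
  omega

lemma foldl_append_map (f : Int → String) : ∀ (l : List Int) (acc : List String),
    l.foldl (fun a i => a ++ [f i]) acc = acc ++ l.map f := by
  intro l
  induction l with
  | nil => simp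
  | cons x l ih => intro acc; simp [ih]

lemma foldl_append_id : ∀ (l acc : List String),
    l.foldl (fun a c => a ++ [c]) acc = acc ++ l := by
  intro l
  induction l with
  | nil => simp
  | cons x l ih => intro acc; simp [ih]

lemma conditions_automata_eq (s : String) (n : Int) :
    conditions_automata s n = (PySem.List.pyRange 0 n 1).map (fun i => s ++ PySem.Int.toStr i) := by
  unfold conditions_automata
  simpa using foldl_append_map (fun i => s ++ PySem.Int.toStr i) (PySem.List.pyRange 0 n 1) []

lemma conditions_automata_nodup (s : String) (n : Int) : (conditions_automata s n).Nodup := by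
  rw [conditions_automata_eq]
  apply List.Nodup.map_on _ (PySem.List.nodup_pyRange_one 0 n)
  intro x hx y hy hxy
  rw [PySem.List.mem_pyRange_one] at hx hy
  have hts : PySem.Int.toStr x = PySem.Int.toStr y := by
    have h1 := congrArg String.toList hxy
    simp only [String.toList_append] at h1
    exact String.toList_inj.mp (List.append_cancel_left h1)
  exact toStr_inj_nonneg x y hx.1 hy.1 hts

lemma selA_inner_eq (st : List String × List String) (item : String) :
    selA_inner st item =
      if item ∈ st.1 then st else (st.1 ++ [item], st.2.erase (pySplitHead item)) := by
  unfold selA_inner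
  by_cases h1 : item ∈ st.1
  · simp [h1]
  · simp only [h1, if_neg, not_false_iff, if_false]
    congr 1
    by_cases h2 : st.2 ≠ [] ∧ pySplitHead item ∈ st.2
    · simp [h2]
    · rw [if_neg h2]
      push_neg at h2
      by_cases h3 : st.2 = []
      · simp [h3]
      · rw [List.erase_of_not_mem (h2 h3)]

lemma foldl_selA_inner (l : List String) : ∀ (ts cs : List String),
    l.foldl selA_inner (ts, cs) =
      (ts ++ pvDedupFrom ts l,
       ((pvDedupFrom ts l).map pySplitHead).foldl (fun cs h => cs.erase h) cs) := by
  induction l with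
  | nil => intro ts cs; simp [pvDedupFrom]
  | cons x l ih =>
    intro ts cs
    simp only [List.foldl_cons, selA_inner_eq]
    by_cases hx : x ∈ ts
    · simp only [hx, if_pos]
      rw [ih ts cs, pvDedupFrom, if_pos hx]
    · simp only [hx, if_neg, not_false_iff, if_false]
      rw [ih (ts ++ [x]) (cs.erase (pySplitHead x)), pvDedupFrom, if_neg hx]
      simp

lemma foldl_foldl_flatMap (ls : List (List String)) (g : List String → List String) :
    ∀ (st : List String × List String),
    ls.foldl (fun st sub => (g sub).foldl selA_inner st) st =
      (ls.flatMap g).foldl selA_inner st := by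
  induction ls with
  | nil => intro st; simp
  | cons s ls ih => intro st; simp [List.foldl_append, ih]

lemma foldl_add_eq (l : List String) : ∀ (s : List String),
    l.foldl PySem.Set.add s = s ++ pvDedupFrom s l := by
  induction l with
  | nil => intro s; simp [pvDedupFrom]
  | cons x l ih =>
    intro s
    simp only [List.foldl_cons, pvDedupFrom]
    by_cases hx : x ∈ s
    · rw [if_pos hx]
      have hadd : PySem.Set.add s x = s := by simp [PySem.Set.add, hx]
      rw [hadd, ih]
    · rw [if_neg hx]
      have hadd : PySem.Set.add s x = s ++ [x] := by simp [PySem.Set.add, hx]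
      rw [hadd, ih]
      simp

lemma dedup_eq_pvDedupFrom (l : List String) : PySem.List.dedup l = pvDedupFrom [] l := by
  rw [PySem.List.dedup_eq_ofList, PySem.Set.ofList_eq_foldl]
  simpa using foldl_add_eq l []

lemma eraseFoldl_eq_filter : ∀ (hs cs : List String), cs.Nodup →
    hs.foldl (fun cs h => cs.erase h) cs = cs.filter (fun c => !(hs.contains c)) := by
  intro hs
  induction hs with
  | nil => intro cs _; simp
  | cons h hs ih =>
    intro cs hnd
    simp only [List.foldl_cons]
    rw [ih (cs.erase h) (hnd.erase h), List.Nodup.erase_eq_filter hnd, List.filter_filter]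
    apply List.filter_congr
    intro c _
    by_cases hch : c = h <;> by_cases hcs : c ∈ hs <;>
      simp [List.contains_cons, hch, hcs]

lemma set_contains_ofList (hs : List String) (c : String) :
    PySem.Set.contains (PySem.Set.ofList hs) c = hs.contains c := by
  have h1 : PySem.Set.contains (PySem.Set.ofList hs) c = true ↔ c ∈ PySem.Set.ofList hs := by
    simp [PySem.Set.contains]
  have h2 : c ∈ PySem.Set.ofList hs ↔ c ∈ hs := PySem.Set.mem_ofList hs c
  by_cases h : c ∈ hs
  · simp [h1, h2, h, List.contains_iff_mem]
  · have h3 : ¬ (PySem.Set.contains (PySem.Set.ofList hs) c = true) := by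
      rw [h1, h2]; exact h
    simp only [Bool.not_eq_true] at h3
    simp [h3, h]

-- ===== VERDICT (by name: the statement is the Claim_ definition above) =====
theorem selection_unique_transitions_spec : Claim_equal_selection_unique_transitions := by
  intro lines _ _
  unfold Spec_selection_unique_transitions
  unfold selection_unique_transitions selection_unique_transitions_alt
  simp only
  rw [foldl_foldl_flatMap, foldl_selA_inner]
  dsimp only
  rw [foldl_append_id, eraseFoldl_eq_filter _ _ (conditions_automata_nodup _ _),
    dedup_eq_pvDedupFrom, ← conditions_automata_eq]
  simp only [set_contains_ofList, List.nil_append]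

@[simp] theorem selection_unique_transitions_raises : Claim_raises_selection_unique_transitions := by
  unfold Claim_raises_selection_unique_transitions
  constructor
  · intro lines _ hr hp
    exact hp.2 hr.2
  · decide
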